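-- pv_equiv track=rewrite | github.com/Leo-Zh9/pyjarvis | main.py | _select_cursor_hand
-- ===== SOURCE A (Python) =====
-- from typing import List, Optional, Tuple
--
-- Point = Tuple[int, int]
--
-- def inside_box_margin(
--     x: int,
--     y: int,
--     top_left: Point,
--     bottom_right: Point,
--     margin: int = 25,
-- ) -> bool:
--     return (
--         (top_left[0] - margin) <= x <= (bottom_right[0] + margin)
--         and (top_left[1] - margin) <= y <= (bottom_right[1] + margin)
--     )
--
-- def _select_cursor_hand(
--     positions: List[Optional[Point]],
--     top_left: Point,
--     bottom_right: Point,
--     margin: int = 25,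
-- ) -> Optional[int]:
--     best_idx: Optional[int] = None
--     best_depth = -9999
--     fallback_idx: Optional[int] = None
--
--     for idx, position in enumerate(positions):
--         if position is None:
--             continue
--         if fallback_idx is None:
--             fallback_idx = idx
--         x, y = position
--         if inside_box_margin(x, y, top_left, bottom_right, margin):
--             depth = bottom_right[1] - y
--             if depth > best_depth:
--                 best_depth = depth
--                 best_idx = idx
--
--     if best_idx is not None:
--         return best_idx
--
--     return fallback_idx
-- ===== SOURCE B (Python) =====
-- from typing import List, Optional, Tuple
--
-- Point = Tuple[int, int]
--
-- def inside_box_margin(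
--     x: int,
--     y: int,
--     top_left: Point,
--     bottom_right: Point,
--     margin: int = 25,
-- ) -> bool:
--     return (
--         (top_left[0] - margin) <= x <= (bottom_right[0] + margin)
--         and (top_left[1] - margin) <= y <= (bottom_right[1] + margin)
--     )
--
-- def _select_cursor_hand(
--     positions: List[Optional[Point]],
--     top_left: Point,
--     bottom_right: Point,
--     margin: int = 25,
-- ) -> Optional[int]:
--     # Decorate-sort-pick: sort (y, index) tuples of the in-box hands lexicographically;
--     # the first tuple has minimal y (= maximal depth), earliest index on ties.
--     decorated = sorted(
--         (p[1], i)
--         for i, p in enumerate(positions)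
--         if p is not None and inside_box_margin(p[0], p[1], top_left, bottom_right, margin)
--     )
--     if decorated:
--         return decorated[0][1]
--     return next((i for i, p in enumerate(positions) if p is not None), None)
-- ===== Notes on version B (the rewrite author's own statement) =====
-- stated objective: alternative
-- what changed: Replaces A's fused single-pass running best/fallback/sentinel loop by a decorate-sort-pick scheme: build (y, index) tuples of the in-box hands, sort them lexicographically and take the first tuple's index, with a separate first-non-None scan as fallback.
-- intended difference: On inputs where some position lies inside the margin box but every such candidate has depth bottom_right[1]-y <= -9999 (below A's -9999 sentinel) and the first non-None position is not the earliest deepest candidate, A ignores all candidates and returns the first non-None index, while B returns the earliest deepest in-box candidate, which is the intended selection. — e.g. on _select_cursor_hand([some (20000, 0), some (0, 10000)], (0, 0), (0, 0), 10000): A returns some 0, B returns some 1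
import Mathlib
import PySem

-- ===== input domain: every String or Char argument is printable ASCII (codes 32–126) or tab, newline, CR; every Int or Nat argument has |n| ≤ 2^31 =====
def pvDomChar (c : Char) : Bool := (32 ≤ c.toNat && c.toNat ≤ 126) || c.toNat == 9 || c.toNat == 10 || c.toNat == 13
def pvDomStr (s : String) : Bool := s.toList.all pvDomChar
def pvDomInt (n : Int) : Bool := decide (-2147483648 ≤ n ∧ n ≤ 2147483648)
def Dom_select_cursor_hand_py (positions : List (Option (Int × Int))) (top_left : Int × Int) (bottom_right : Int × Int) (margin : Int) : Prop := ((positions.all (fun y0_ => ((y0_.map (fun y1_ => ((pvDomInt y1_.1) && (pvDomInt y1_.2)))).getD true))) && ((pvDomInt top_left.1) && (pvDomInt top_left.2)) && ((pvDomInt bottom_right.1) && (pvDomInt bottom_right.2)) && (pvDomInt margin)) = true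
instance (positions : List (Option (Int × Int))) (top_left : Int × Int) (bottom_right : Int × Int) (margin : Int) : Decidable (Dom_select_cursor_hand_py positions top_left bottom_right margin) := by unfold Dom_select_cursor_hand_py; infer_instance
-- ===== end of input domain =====

-- B replaces A's fused single pass (running best/fallback/sentinel state) by a decorate-sort-pick
-- scheme: the (y, index) tuples of the in-box hands are sorted lexicographically and the first
-- tuple's index is returned, with an independent first-non-None scan as fallback (objective:
-- alternative). B drops A's -9999 depth sentinel; the resulting intended difference on deep
-- candidates is stated in D_select_cursor_hand_py below.

-- ===== PORT A =====
-- helper shared by both Python versions (module-level inside_box_margin)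
def inside_box_margin (x y : Int) (top_left bottom_right : Int × Int) (margin : Int) : Bool :=
  decide (top_left.1 - margin ≤ x) && decide (x ≤ bottom_right.1 + margin) &&
  decide (top_left.2 - margin ≤ y) && decide (y ≤ bottom_right.2 + margin)

-- loop body of A (one enumerate step over the state (best_idx, best_depth, fallback_idx))
def pvStepA (top_left bottom_right : Int × Int) (margin : Int)
    (st : Option Int × Int × Option Int) (ip : Int × Option (Int × Int)) :
    Option Int × Int × Option Int :=
  match ip.2 with
  | none => st
  | some p =>
    let fb := if st.2.2 = none then some ip.1 else st.2.2
    if inside_box_margin p.1 p.2 top_left bottom_right margin then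
      if st.2.1 < bottom_right.2 - p.2 then (some ip.1, bottom_right.2 - p.2, fb)
      else (st.1, st.2.1, fb)
    else (st.1, st.2.1, fb)

def select_cursor_hand_py (positions : List (Option (Int × Int))) (top_left : Int × Int) (bottom_right : Int × Int) (margin : Int) : Option Int :=
  let r := (PySem.List.enumerate positions).foldl (pvStepA top_left bottom_right margin) (none, -9999, none)
  if r.1.isSome then r.1 else r.2.2

-- ===== PORT B =====
-- the decorating comprehension's element: keep (p[1], i) when p is not None and inside the margin box
def pvKeep2 (top_left bottom_right : Int × Int) (margin : Int) (ip : Int × Option (Int × Int)) :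
    Option (Int × Int) :=
  match ip.2 with
  | some p => if inside_box_margin p.1 p.2 top_left bottom_right margin then some (p.2, ip.1) else none
  | none => none

def select_cursor_hand_py_alt (positions : List (Option (Int × Int))) (top_left : Int × Int) (bottom_right : Int × Int) (margin : Int) : Option Int :=
  let decorated := PySem.List.sorted2
    ((PySem.List.enumerate positions).filterMap (pvKeep2 top_left bottom_right margin))
    (·.1) (·.2)
  match decorated with
  | d :: _ => some d.2
  | [] => ((PySem.List.enumerate positions).find? (fun ip => ip.2.isSome)).map (·.1)

-- ===== PRECONDITION & SPEC =====
-- On inputs where some position lies inside the margin box but every such candidate has depth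
-- bottom_right[1] - y ≤ -9999 (below A's -9999 sentinel) and the first non-None position is not the
-- earliest deepest candidate, A ignores all candidates and returns the first non-None index, while B
-- returns the earliest deepest in-box candidate, which is the intended selection.
def D_select_cursor_hand_py (positions : List (Option (Int × Int))) (top_left : Int × Int) (bottom_right : Int × Int) (margin : Int) : Prop :=
  let cs := positions.reduceOption.filter fun p => inside_box_margin p.1 p.2 top_left bottom_right margin
  cs ≠ [] ∧ (∀ p ∈ cs, bottom_right.2 + 9999 ≤ p.2) ∧
    ∀ f ∈ positions.reduceOption.head?, inside_box_margin f.1 f.2 top_left bottom_right margin = true →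
      ∃ p ∈ cs, p.2 < f.2
instance (positions : List (Option (Int × Int))) (top_left : Int × Int) (bottom_right : Int × Int) (margin : Int) : Decidable (D_select_cursor_hand_py positions top_left bottom_right margin) := by
  unfold D_select_cursor_hand_py; infer_instance

def Spec_select_cursor_hand_py (positions : List (Option (Int × Int))) (top_left : Int × Int) (bottom_right : Int × Int) (margin : Int) (out : Option Int) : Prop := ¬ D_select_cursor_hand_py positions top_left bottom_right margin → out = select_cursor_hand_py_alt positions top_left bottom_right margin
instance (positions : List (Option (Int × Int))) (top_left : Int × Int) (bottom_right : Int × Int) (margin : Int) (out : Option Int) : Decidable (Spec_select_cursor_hand_py positions top_left bottom_right margin out) := by unfold Spec_select_cursor_hand_py; infer_instance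

def pvDiffWitness_select_cursor_hand_py : (List (Option (Int × Int))) × (Int × Int) × (Int × Int) × Int :=
  ([some (20000, 0), some (0, 10000)], (0, 0), (0, 0), 10000)

def pvDiffWitnessOut_select_cursor_hand_py : (Option Int) × (Option Int) := (some 0, some 1)

-- ===== CLAIM (what is proved, stated in full; the proofs are below) =====
def Claim_unchanged_select_cursor_hand_py : Prop := ∀ (positions : List (Option (Int × Int))) (top_left : Int × Int) (bottom_right : Int × Int) (margin : Int), Dom_select_cursor_hand_py positions top_left bottom_right margin → Spec_select_cursor_hand_py positions top_left bottom_right margin (select_cursor_hand_py positions top_left bottom_right margin)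
def Claim_changed_select_cursor_hand_py : Prop := Dom_select_cursor_hand_py (pvDiffWitness_select_cursor_hand_py.1) (pvDiffWitness_select_cursor_hand_py.2.1) (pvDiffWitness_select_cursor_hand_py.2.2.1) (pvDiffWitness_select_cursor_hand_py.2.2.2) ∧ D_select_cursor_hand_py (pvDiffWitness_select_cursor_hand_py.1) (pvDiffWitness_select_cursor_hand_py.2.1) (pvDiffWitness_select_cursor_hand_py.2.2.1) (pvDiffWitness_select_cursor_hand_py.2.2.2) ∧ select_cursor_hand_py (pvDiffWitness_select_cursor_hand_py.1) (pvDiffWitness_select_cursor_hand_py.2.1) (pvDiffWitness_select_cursor_hand_py.2.2.1) (pvDiffWitness_select_cursor_hand_py.2.2.2) = pvDiffWitnessOut_select_cursor_hand_py.1 ∧ select_cursor_hand_py_alt (pvDiffWitness_select_cursor_hand_py.1) (pvDiffWitness_select_cursor_hand_py.2.1) (pvDiffWitness_select_cursor_hand_py.2.2.1) (pvDiffWitness_select_cursor_hand_py.2.2.2) = pvDiffWitnessOut_select_cursor_hand_py.2 ∧ pvDiffWitnessOut_select_cursor_hand_py.1 ≠ pvDiffWitnessOut_select_cursor_hand_p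y.2
def Claim_exact_select_cursor_hand_py : Prop := ∀ (positions : List (Option (Int × Int))) (top_left : Int × Int) (bottom_right : Int × Int) (margin : Int), Dom_select_cursor_hand_py positions top_left bottom_right margin → D_select_cursor_hand_py positions top_left bottom_right margin → select_cursor_hand_py positions top_left bottom_right margin ≠ select_cursor_hand_py_alt positions top_left bottom_right margin

-- ===== LEMMAS AND PROOFS =====

-- the in-box candidate (index, point) pairs, used to characterise BOTH programs
def pvKeep (top_left bottom_right : Int × Int) (margin : Int) (ip : Int × Option (Int × Int)) :
    Option (Int × (Int × Int)) :=
  match ip.2 with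
  | some p => if inside_box_margin p.1 p.2 top_left bottom_right margin then some (ip.1, p) else none
  | none => none

-- first-maximal fold: pushing a head into PySem.List.max?'s left fold
theorem pv_max_go {α : Type} (key : α → Int) :
    ∀ (t : List α) (x : α),
      List.foldl (fun acc y => match acc with
        | none => some y
        | some m => if key m < key y then some y else some m) (some x) t
      = match PySem.List.max? t key with
        | none => some x
        | some m => if key x < key m then some m else some x := by
  intro t
  induction t with
  | nil => intro x; simp [PySem.List.max?]
  | cons y t ih =>
    intro x
    have hy : PySem.List.max? (y :: t) key
        = List.foldl (fun acc z => match acc with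
            | none => some z
            | some m => if key m < key z then some z else some m) (some y) t := rfl
    rw [List.foldl_cons, hy, ih y]
    by_cases hxy : key x < key y
    · simp only [hxy, if_true]
      rw [ih y]
      rcases hmt : PySem.List.max? t key with _ | m
      · simp [hxy]
      · by_cases hym : key y < key m
        · simp [hym, show key x < key m by omega]
        · simp [hym, hxy]
    · simp only [hxy, if_false]
      rw [ih x]
      rcases hmt : PySem.List.max? t key with _ | m
      · simp [hxy]
      · by_cases hym : key y < key m
        · by_cases hxm : key x < key m
          · simp [hym, hxm]
          · simp [hym, hxm]
        · simp [hym, hxy, show ¬ key x < key m by omega]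

theorem pv_max_cons {α : Type} (key : α → Int) (x : α) (t : List α) :
    PySem.List.max? (x :: t) key
      = match PySem.List.max? t key with
        | none => some x
        | some m => if key x < key m then some m else some x := by
  have : PySem.List.max? (x :: t) key
      = List.foldl (fun acc y => match acc with
          | none => some y
          | some m => if key m < key y then some y else some m) (some x) t := rfl
  rw [this, pv_max_go]

-- the best-candidate part of A's fold state
def pvBest (top_left bottom_right : Int × Int) (margin : Int)
    (E : List (Int × Option (Int × Int))) (b : Option Int) (d : Int) : Option Int × Int :=
  match PySem.List.max? (E.filterMap (pvKeep top_left bottom_right margin))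
      (fun ip => bottom_right.2 - ip.2.2) with
  | none => (b, d)
  | some mp => if d < bottom_right.2 - mp.2.2 then (some mp.1, bottom_right.2 - mp.2.2) else (b, d)

-- the fallback part of A's fold state
def pvFb (E : List (Int × Option (Int × Int))) (fb : Option Int) : Option Int :=
  if fb.isSome then fb else (E.find? (fun ip => ip.2.isSome)).map (·.1)

-- characterisation of A's whole fold: one cons-step lemma per state component
theorem pv_pvFb_cons_none (i : Int) (t : List (Int × Option (Int × Int))) (fb : Option Int) :
    pvFb (((i : Int), (none : Option (Int × Int))) :: t) fb = pvFb t fb := by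
  simp [pvFb]

theorem pv_pvFb_cons_some (i : Int) (p : Int × Int) (t : List (Int × Option (Int × Int))) (fb : Option Int) :
    pvFb ((i, some p) :: t) fb = pvFb t (if fb = none then some i else fb) := by
  rcases fb <;> simp [pvFb]

theorem pv_pvBest_cons_skip (top_left bottom_right : Int × Int) (margin : Int)
    (hd : Int × Option (Int × Int)) (t : List (Int × Option (Int × Int)))
    (h : pvKeep top_left bottom_right margin hd = none) (b : Option Int) (d : Int) :
    pvBest top_left bottom_right margin (hd :: t) b d = pvBest top_left bottom_right margin t b d := by
  simp [pvBest, List.filterMap_cons_none h]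

theorem pv_pvBest_cons_cand (top_left bottom_right : Int × Int) (margin : Int)
    (i : Int) (p : Int × Int) (t : List (Int × Option (Int × Int)))
    (h : inside_box_margin p.1 p.2 top_left bottom_right margin = true) (b : Option Int) (d : Int) :
    pvBest top_left bottom_right margin ((i, some p) :: t) b d
      = pvBest top_left bottom_right margin t
          (if d < bottom_right.2 - p.2 then some i else b)
          (if d < bottom_right.2 - p.2 then bottom_right.2 - p.2 else d) := by
  have hk : pvKeep top_left bottom_right margin (i, some p) = some (i, p) := by
    simp [pvKeep, h]
  unfold pvBest
  rw [List.filterMap_cons_some hk, pv_max_cons]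
  rcases hmt : PySem.List.max? (t.filterMap (pvKeep top_left bottom_right margin))
      (fun ip => bottom_right.2 - ip.2.2) with _ | mq
  · by_cases hdk : d < bottom_right.2 - p.2 <;> simp [hdk]
  · by_cases hdk : d < bottom_right.2 - p.2 <;>
      by_cases hkm : bottom_right.2 - p.2 < bottom_right.2 - mq.2.2 <;>
      by_cases hdm : d < bottom_right.2 - mq.2.2 <;>
      simp [hdk, hkm, hdm] <;> omega

theorem pv_foldA_char (top_left bottom_right : Int × Int) (margin : Int) :
    ∀ (E : List (Int × Option (Int × Int))) (b : Option Int) (d : Int) (fb : Option Int),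
      E.foldl (pvStepA top_left bottom_right margin) (b, d, fb)
        = ((pvBest top_left bottom_right margin E b d).1,
           (pvBest top_left bottom_right margin E b d).2,
           pvFb E fb) := by
  intro E
  induction E with
  | nil => intro b d fb; simp [pvBest, pvFb, PySem.List.max?]
  | cons hd t ih =>
    intro b d fb
    obtain ⟨i, op⟩ := hd
    rcases op with _ | p
    · rw [List.foldl_cons]
      have hk : pvKeep top_left bottom_right margin (i, (none : Option (Int × Int))) = none := rfl
      simp only [pvStepA]
      rw [ih b d fb, pv_pvBest_cons_skip _ _ _ _ _ hk, pv_pvFb_cons_none]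
    · rw [List.foldl_cons]
      by_cases hin : inside_box_margin p.1 p.2 top_left bottom_right margin = true
      · have hstep : pvStepA top_left bottom_right margin (b, d, fb) (i, some p)
            = ((if d < bottom_right.2 - p.2 then some i else b),
               (if d < bottom_right.2 - p.2 then bottom_right.2 - p.2 else d),
               (if fb = none then some i else fb)) := by
          simp only [pvStepA, hin, if_true]
          split_ifs <;> rfl
        rw [hstep, ih, pv_pvBest_cons_cand _ _ _ _ _ _ hin, pv_pvFb_cons_some]
      · have hk : pvKeep top_left bottom_right margin (i, some p) = none := by
          simp [pvKeep, hin]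
        have hstep : pvStepA top_left bottom_right margin (b, d, fb) (i, some p)
            = (b, d, (if fb = none then some i else fb)) := by
          simp [pvStepA, hin]
        rw [hstep, ih, pv_pvBest_cons_skip _ _ _ _ _ hk, pv_pvFb_cons_some]

-- pvKeep preserves the index component
theorem pv_keep_fst (top_left bottom_right : Int × Int) (margin : Int)
    (ip : Int × Option (Int × Int)) (q : Int × (Int × Int))
    (h : pvKeep top_left bottom_right margin ip = some q) : q.1 = ip.1 := by
  rcases ip with ⟨i, op⟩
  rcases op with _ | p <;> simp only [pvKeep] at h
  · cases h
  · split at h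
    · cases h; rfl
    · cases h

-- candidate lists inherit strictly increasing indices from enumerate
theorem pv_cands_pairwise (positions : List (Option (Int × Int))) (top_left bottom_right : Int × Int) (margin : Int) :
    ((PySem.List.enumerate positions).filterMap (pvKeep top_left bottom_right margin)).Pairwise
      (fun a b => a.1 < b.1) := by
  have h := PySem.List.pairwise_lt_enumerate (xs := positions) (s := 0)
  refine List.Pairwise.filterMap _ (fun a b hab x hx y hy => ?_) h
  have h1 := pv_keep_fst _ _ _ _ _ hx
  have h2 := pv_keep_fst _ _ _ _ _ hy
  simp only [h1, h2]
  exact hab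

-- first-maximal tie-breaking: max? returns the minimal index among key-maximal pairs
theorem pv_max_first {β : Type} (key : Int × β → Int) :
    ∀ (l : List (Int × β)), l.Pairwise (fun a b => a.1 < b.1) →
      ∀ (mp : Int × β), PySem.List.max? l key = some mp →
        ∀ q ∈ l, ¬ key q < key mp → mp.1 ≤ q.1 := by
  intro l
  induction l with
  | nil => intro _ mp h; simp [PySem.List.max?] at h
  | cons x t ih =>
    intro hp mp hm q hq hk
    rw [pv_max_cons] at hm
    rcases List.pairwise_cons.mp hp with ⟨hx, hpt⟩
    rcases hmt : PySem.List.max? t key with _ | mq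
    · rw [hmt] at hm
      simp only [] at hm
      cases hm
      rcases List.mem_cons.mp hq with rfl | hq'
      · omega
      · exact le_of_lt (hx q hq')
    · rw [hmt] at hm
      simp only [] at hm
      by_cases hxm : key x < key mq
      · rw [if_pos hxm] at hm
        cases hm
        rcases List.mem_cons.mp hq with rfl | hq'
        · omega
        · exact ih hpt mp hmt q hq' hk
      · rw [if_neg hxm] at hm
        cases hm
        rcases List.mem_cons.mp hq with rfl | hq'
        · omega
        · have := PySem.List.max?_isMax hmt q hq'
          exact le_of_lt (hx q hq')

-- find? on an index-sorted list: the found member has minimal index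
theorem pv_find_min {β : Type} (P : Int × β → Bool) :
    ∀ (l : List (Int × β)), l.Pairwise (fun a b => a.1 < b.1) →
      ∀ fr, l.find? P = some fr → ∀ q ∈ l, P q = true → fr.1 ≤ q.1 := by
  intro l
  induction l with
  | nil => intro _ fr h; simp at h
  | cons x t ih =>
    intro hp fr hf q hq hPq
    rcases List.pairwise_cons.mp hp with ⟨hx, hpt⟩
    by_cases hPx : P x = true
    · rw [List.find?_cons_of_pos hPx] at hf
      cases hf
      rcases List.mem_cons.mp hq with rfl | hq'
      · omega
      · exact le_of_lt (hx q hq')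
    · rw [List.find?_cons_of_neg (by simpa using hPx)] at hf
      rcases List.mem_cons.mp hq with rfl | hq'
      · exact absurd hPq hPx
      · exact ih hpt fr hf q hq' hPq

-- members of an index-sorted list are determined by their index
theorem pv_fst_inj {β : Type} :
    ∀ (l : List (Int × β)), l.Pairwise (fun a b => a.1 < b.1) →
      ∀ a ∈ l, ∀ b ∈ l, a.1 = b.1 → a = b := by
  intro l
  induction l with
  | nil => intro _ a h; simp at h
  | cons x t ih =>
    intro hp a ha b hb hab
    rcases List.pairwise_cons.mp hp with ⟨hx, hpt⟩
    rcases List.mem_cons.mp ha with rfl | ha' <;> rcases List.mem_cons.mp hb with rfl | hb'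
    · rfl
    · exact absurd hab (by have := hx b hb'; omega)
    · exact absurd hab (by have := hx a ha'; omega)
    · exact ih hpt a ha' b hb' hab

-- membership bridge between candidate pairs and enumerate pairs
theorem pv_mem_cands_iff (positions : List (Option (Int × Int))) (top_left bottom_right : Int × Int)
    (margin : Int) (q : Int × (Int × Int)) :
    q ∈ (PySem.List.enumerate positions).filterMap (pvKeep top_left bottom_right margin)
      ↔ (q.1, some q.2) ∈ PySem.List.enumerate positions ∧
        inside_box_margin q.2.1 q.2.2 top_left bottom_right margin = true := by
  rw [List.mem_filterMap]
  constructor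
  · rintro ⟨⟨i, op⟩, hmem, hk⟩
    rcases op with _ | p
    · simp [pvKeep] at hk
    · simp only [pvKeep] at hk
      split at hk
      · cases hk; exact ⟨hmem, by assumption⟩
      · cases hk
  · rintro ⟨hmem, hin⟩
    exact ⟨(q.1, some q.2), hmem, by simp [pvKeep, hin]⟩

-- any in-box entry of enumerate yields a member of the candidate list
theorem pv_mem_cands_of_cand (positions : List (Option (Int × Int))) (top_left bottom_right : Int × Int)
    (margin : Int) (ip : Int × Option (Int × Int))
    (hip : ip ∈ PySem.List.enumerate positions)
    (p : Int × Int) (hp : ip.2 = some p)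
    (hin : inside_box_margin p.1 p.2 top_left bottom_right margin = true) :
    (ip.1, p) ∈ (PySem.List.enumerate positions).filterMap (pvKeep top_left bottom_right margin) := by
  refine (pv_mem_cands_iff positions top_left bottom_right margin (ip.1, p)).mpr ⟨?_, hin⟩
  rcases ip with ⟨i, op⟩
  cases hp
  exact hip

-- membership bridges between positions and its enumerate pairs
theorem pv_snd_mem (positions : List (Option (Int × Int))) (ip : Int × Option (Int × Int))
    (hip : ip ∈ PySem.List.enumerate positions) : ip.2 ∈ positions := by
  have h := List.mem_map_of_mem (f := fun q : Int × Option (Int × Int) => q.2) hip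
  rwa [PySem.List.map_snd_enumerate] at h

theorem pv_mem_enum (positions : List (Option (Int × Int))) (o : Option (Int × Int))
    (ho : o ∈ positions) : ∃ i : Int, (i, o) ∈ PySem.List.enumerate positions := by
  rcases List.mem_iff_getElem.mp ho with ⟨k, hk, rfl⟩
  exact ⟨(k : Int), (PySem.List.mem_enumerate_iff _ _ _).mpr ⟨k, hk, by simp⟩⟩

-- the first non-None position is the head of reduceOption
theorem pv_find_head :
    ∀ (positions : List (Option (Int × Int))) (s : Int) (fr : Int × Option (Int × Int)),
      (PySem.List.enumerate positions s).find? (fun q => q.2.isSome) = some fr →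
      positions.reduceOption.head? = fr.2 := by
  intro positions
  induction positions with
  | nil => intro s fr h; rw [PySem.List.enumerate_nil] at h; cases h
  | cons o t ih =>
    intro s fr h
    rw [PySem.List.enumerate_cons] at h
    rcases o with _ | p
    · rw [List.find?_cons_of_neg (by simp)] at h
      simpa [List.reduceOption_cons_of_none] using ih (s + 1) fr h
    · rw [List.find?_cons_of_pos (by simp)] at h
      cases h
      simp [List.reduceOption_cons_of_some]

-- a candidate point of D_ yields a member of the candidate-pair list
theorem pv_cs_to_cands (positions : List (Option (Int × Int))) (top_left bottom_right : Int × Int)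
    (margin : Int) (p : Int × Int)
    (hp : p ∈ positions.reduceOption.filter fun p => inside_box_margin p.1 p.2 top_left bottom_right margin) :
    inside_box_margin p.1 p.2 top_left bottom_right margin = true ∧
    ∃ i : Int, (i, p) ∈ (PySem.List.enumerate positions).filterMap (pvKeep top_left bottom_right margin) := by
  rcases List.mem_filter.mp hp with ⟨hred, hin⟩
  refine ⟨hin, ?_⟩
  obtain ⟨i, hiE⟩ := pv_mem_enum positions (some p) (List.reduceOption_mem_iff.mp hred)
  exact ⟨i, pv_mem_cands_of_cand positions top_left bottom_right margin (i, some p) hiE p rfl hin⟩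

-- B's decorated list is the candidate list with each (i, p) turned into (p.2, i)
theorem pv_dec_eq (positions : List (Option (Int × Int))) (top_left bottom_right : Int × Int) (margin : Int) :
    (PySem.List.enumerate positions).filterMap (pvKeep2 top_left bottom_right margin)
      = ((PySem.List.enumerate positions).filterMap (pvKeep top_left bottom_right margin)).map
          (fun q => (q.2.2, q.1)) := by
  rw [List.map_filterMap]
  apply List.filterMap_congr
  intro ip _
  rcases ip with ⟨i, op⟩
  rcases op with _ | p
  · rfl
  · simp only [pvKeep, pvKeep2]
    split <;> rfl

-- Python's lexicographic sort of (Int, Int) tuples is PySem.List.sorted with a Prod.Lex key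
theorem pv_sorted2_eq_sorted_lex (xs : List (Int × Int)) :
    PySem.List.sorted2 xs (·.1) (·.2)
      = PySem.List.sorted xs (fun q => (toLex q : Int ×ₗ Int)) := by
  rw [PySem.List.sorted_eq_foldl_insertBy]
  show List.foldl (fun acc x => PySem.List.insertBy _ x acc) [] xs = _
  have hfun : (fun (a b : Int × Int) =>
        decide (a.1 < b.1) || (!decide (b.1 < a.1) && decide (a.2 < b.2)))
      = (fun (a b : Int × Int) => decide ((toLex a : Int ×ₗ Int) < toLex b)) := by
    funext a b
    by_cases h1 : a.1 < b.1 <;> by_cases h2 : b.1 < a.1 <;> by_cases h3 : a.2 < b.2 <;>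
      simp [Prod.Lex.lt_iff, h1, h2, h3] <;> omega
  rw [hfun]
  rfl

-- evaluation of B when the candidate list is empty
theorem pv_alt_none (positions : List (Option (Int × Int))) (top_left bottom_right : Int × Int)
    (margin : Int)
    (hC : (PySem.List.enumerate positions).filterMap (pvKeep top_left bottom_right margin) = []) :
    select_cursor_hand_py_alt positions top_left bottom_right margin
      = ((PySem.List.enumerate positions).find? (fun ip => ip.2.isSome)).map (·.1) := by
  unfold select_cursor_hand_py_alt
  rw [pv_dec_eq, hC]
  rfl

-- evaluation of B against A's first-maximal candidate: the sorted head's index is mp.1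
theorem pv_alt_of_max (positions : List (Option (Int × Int))) (top_left bottom_right : Int × Int)
    (margin : Int) (mp : Int × (Int × Int))
    (hM : PySem.List.max? ((PySem.List.enumerate positions).filterMap (pvKeep top_left bottom_right margin))
        (fun ip => bottom_right.2 - ip.2.2) = some mp) :
    select_cursor_hand_py_alt positions top_left bottom_right margin = some mp.1 := by
  have hmpC := PySem.List.max?_mem hM
  have hpw := pv_cands_pairwise positions top_left bottom_right margin
  unfold select_cursor_hand_py_alt
  rw [pv_dec_eq, pv_sorted2_eq_sorted_lex]
  have hne : (((PySem.List.enumerate positions).filterMap (pvKeep top_left bottom_right margin)).map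
      (fun q => (q.2.2, q.1))) ≠ [] := by
    simp only [ne_eq, List.map_eq_nil_iff]
    exact List.ne_nil_of_mem hmpC
  rcases hS : PySem.List.sorted
      (((PySem.List.enumerate positions).filterMap (pvKeep top_left bottom_right margin)).map
        (fun q => (q.2.2, q.1)))
      (fun q => (toLex q : Int ×ₗ Int)) with _ | ⟨h, t⟩
  · exact absurd ((PySem.List.sorted_eq_nil_iff _ _ _).mp hS) hne
  · simp only []
    -- the head is the lexicographic minimum of the decorated list …
    have hmin := PySem.List.key_head_sorted_le _ _ hS
    have hmem : h ∈ ((PySem.List.enumerate positions).filterMap (pvKeep top_left bottom_right margin)).map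
        (fun q => (q.2.2, q.1)) := by
      have : h ∈ PySem.List.sorted
          (((PySem.List.enumerate positions).filterMap (pvKeep top_left bottom_right margin)).map
            (fun q => (q.2.2, q.1)))
          (fun q => (toLex q : Int ×ₗ Int)) := by rw [hS]; exact List.mem_cons_self
      rwa [PySem.List.mem_sorted] at this
    -- … and so is (mp.2.2, mp.1): hence the two coincide
    obtain ⟨c, hcC, hch⟩ := List.mem_map.mp hmem
    have hmpD : ((mp.2.2 : Int), (mp.1 : Int)) ∈
        ((PySem.List.enumerate positions).filterMap (pvKeep top_left bottom_right margin)).map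
          (fun q => (q.2.2, q.1)) := List.mem_map_of_mem hmpC
    have hle1 : (toLex h : Int ×ₗ Int) ≤ toLex (mp.2.2, mp.1) := hmin _ hmpD
    have hle2 : (toLex ((mp.2.2 : Int), (mp.1 : Int)) : Int ×ₗ Int) ≤ toLex h := by
      rw [← hch]
      have hy : mp.2.2 ≤ c.2.2 := by
        have := PySem.List.max?_isMax hM c hcC
        omega
      rcases lt_or_eq_of_le hy with hlt | heq
      · exact le_of_lt (Prod.Lex.lt_iff.mpr (Or.inl hlt))
      · have hi : mp.1 ≤ c.1 := by
          refine pv_max_first (fun ip => bottom_right.2 - ip.2.2) _ hpw mp hM c hcC ?_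
          show ¬ (bottom_right.2 - c.2.2 < bottom_right.2 - mp.2.2)
          omega
        rcases lt_or_eq_of_le hi with hilt | hieq
        · exact le_of_lt (Prod.Lex.lt_iff.mpr (Or.inr ⟨by simpa using heq, by simpa using hilt⟩))
        · have : c = mp := pv_fst_inj _ hpw c hcC mp hmpC hieq.symm
          rw [this]
      
    have hhe : h = (mp.2.2, mp.1) := by
      have := le_antisymm hle1 hle2
      have h2 : h = ((mp.2.2 : Int), (mp.1 : Int)) := by
        have := congrArg (fun z : Int ×ₗ Int => (ofLex z : Int × Int)) this
        simpa using this
      exact h2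
    rw [hhe]

-- ===== VERDICT (by name: the statement is the Claim_ definition above) =====
theorem select_cursor_hand_py_spec : Claim_unchanged_select_cursor_hand_py := by
  unfold Claim_unchanged_select_cursor_hand_py
  intro positions top_left bottom_right margin _hdom hnd
  rcases hM : PySem.List.max?
      ((PySem.List.enumerate positions).filterMap (pvKeep top_left bottom_right margin))
      (fun ip => bottom_right.2 - ip.2.2) with _ | mp
  · have hC := (PySem.List.max?_eq_none_iff _ _).mp hM
    rw [pv_alt_none _ _ _ _ hC]
    unfold select_cursor_hand_py
    rw [pv_foldA_char]
    simp [pvBest, pvFb, hM]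
  · have hmpC := PySem.List.max?_mem hM
    rw [pv_alt_of_max _ _ _ _ _ hM]
    unfold select_cursor_hand_py
    rw [pv_foldA_char]
    by_cases hk : -9999 < bottom_right.2 - mp.2.2
    · simp [pvBest, hM, hk]
    · -- deep-candidates case: A falls back; ¬D_ forces the fallback index to equal mp.1
      rcases (pv_mem_cands_iff positions top_left bottom_right margin mp).mp hmpC with ⟨hmpE, hmpIn⟩
      have hmpCs : mp.2 ∈ positions.reduceOption.filter fun p => inside_box_margin p.1 p.2 top_left bottom_right margin :=
        List.mem_filter.mpr ⟨List.reduceOption_mem_iff.mpr (pv_snd_mem positions (mp.1, some mp.2) hmpE), hmpIn⟩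
      have c1 : (positions.reduceOption.filter fun p => inside_box_margin p.1 p.2 top_left bottom_right margin) ≠ [] := List.ne_nil_of_mem hmpCs
      have c2 : ∀ p ∈ positions.reduceOption.filter fun p => inside_box_margin p.1 p.2 top_left bottom_right margin, bottom_right.2 + 9999 ≤ p.2 := by
        intro p hp
        obtain ⟨-, i, hpC⟩ := pv_cs_to_cands positions top_left bottom_right margin p hp
        have hmax : bottom_right.2 - p.2 ≤ bottom_right.2 - mp.2.2 :=
          PySem.List.max?_isMax hM (i, p) hpC
        omega
      have hth : ¬ ∀ f ∈ positions.reduceOption.head?,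
          inside_box_margin f.1 f.2 top_left bottom_right margin = true →
          ∃ p ∈ positions.reduceOption.filter fun p => inside_box_margin p.1 p.2 top_left bottom_right margin, p.2 < f.2 :=
        fun h3 => hnd ⟨c1, c2, h3⟩
      push Not at hth
      obtain ⟨pf, hpfHead, hpfIn, hpfMin⟩ := hth
      rcases hF : (PySem.List.enumerate positions).find? (fun q => q.2.isSome) with _ | fr
      · have hnone := List.find?_eq_none.mp hF (mp.1, some mp.2) hmpE
        simp at hnone
      · have hhead : positions.reduceOption.head? = fr.2 := pv_find_head positions 0 fr hF
        have hfr2 : fr.2 = some pf := by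
          rw [← hhead]
          exact Option.mem_def.mp hpfHead
        have hfrE := List.mem_of_find?_eq_some hF
        have hpfC := pv_mem_cands_of_cand positions top_left bottom_right margin fr hfrE pf hfr2 hpfIn
        have hle : bottom_right.2 - pf.2 ≤ bottom_right.2 - mp.2.2 :=
          PySem.List.max?_isMax hM (fr.1, pf) hpfC
        have hge : pf.2 ≤ mp.2.2 := hpfMin mp.2 hmpCs
        have hfr1le : fr.1 ≤ mp.1 :=
          pv_find_min _ _ (PySem.List.pairwise_lt_enumerate _ _) fr hF (mp.1, some mp.2) hmpE rfl
        have hmp1le : mp.1 ≤ fr.1 := by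
          have hmin : ¬ bottom_right.2 - pf.2 < bottom_right.2 - mp.2.2 → mp.1 ≤ fr.1 :=
            pv_max_first (fun ip => bottom_right.2 - ip.2.2) _
              (pv_cands_pairwise positions top_left bottom_right margin) mp hM (fr.1, pf) hpfC
          exact hmin (by omega)
        simp [pvBest, pvFb, hM, hk, hF]
        omega

theorem select_cursor_hand_py_changed : Claim_changed_select_cursor_hand_py := by
  unfold Claim_changed_select_cursor_hand_py; decide

theorem select_cursor_hand_py_tight : Claim_exact_select_cursor_hand_py := by
  unfold Claim_exact_select_cursor_hand_py
  intro positions top_left bottom_right margin _hdom hD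
  obtain ⟨c1, c2, c3⟩ := hD
  obtain ⟨p0, hp0⟩ := List.exists_mem_of_ne_nil _ c1
  obtain ⟨hin0, i0, hp0C⟩ := pv_cs_to_cands positions top_left bottom_right margin p0 hp0
  rcases hM : PySem.List.max?
      ((PySem.List.enumerate positions).filterMap (pvKeep top_left bottom_right margin))
      (fun ip => bottom_right.2 - ip.2.2) with _ | mp
  · exact absurd ((PySem.List.max?_eq_none_iff _ _).mp hM) (List.ne_nil_of_mem hp0C)
  · have hmpC := PySem.List.max?_mem hM
    rcases (pv_mem_cands_iff positions top_left bottom_right margin mp).mp hmpC with ⟨hmpE, hmpIn⟩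
    have hmpCs : mp.2 ∈ positions.reduceOption.filter fun p => inside_box_margin p.1 p.2 top_left bottom_right margin :=
      List.mem_filter.mpr ⟨List.reduceOption_mem_iff.mpr (pv_snd_mem positions (mp.1, some mp.2) hmpE), hmpIn⟩
    have hk : ¬ (-9999 < bottom_right.2 - mp.2.2) := by
      have := c2 mp.2 hmpCs
      omega
    rcases hF : (PySem.List.enumerate positions).find? (fun q => q.2.isSome) with _ | fr
    · have hnone := List.find?_eq_none.mp hF (mp.1, some mp.2) hmpE
      simp at hnone
    · have hA : select_cursor_hand_py positions top_left bottom_right margin = some fr.1 := by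
        unfold select_cursor_hand_py
        rw [pv_foldA_char]
        simp [pvBest, pvFb, hM, hk, hF]
      have hB : select_cursor_hand_py_alt positions top_left bottom_right margin = some mp.1 :=
        pv_alt_of_max _ _ _ _ _ hM
      rw [hA, hB]
      intro heq
      have hfr1 : fr.1 = mp.1 := by simpa using heq
      have hfrE := List.mem_of_find?_eq_some hF
      have hfeq : fr = (mp.1, some mp.2) :=
        pv_fst_inj _ (PySem.List.pairwise_lt_enumerate _ _) fr hfrE (mp.1, some mp.2) hmpE hfr1
      have hhead : positions.reduceOption.head? = some mp.2 := by
        rw [pv_find_head positions 0 fr hF, hfeq]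
      obtain ⟨p, hpCs, hplt⟩ := c3 mp.2 hhead hmpIn
      obtain ⟨-, i, hpC⟩ := pv_cs_to_cands positions top_left bottom_right margin p hpCs
      have hle : bottom_right.2 - p.2 ≤ bottom_right.2 - mp.2.2 :=
        PySem.List.max?_isMax hM (i, p) hpC
      omega
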